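-- pv_equiv track=rewrite | github.com/sifaka-ai/sifaka | sifaka/core/thought.py | _filter_content_expansion_suggestions
-- ===== SOURCE A (Python) =====
-- from typing import Any, Dict, List, Optional, Union
--
-- def _filter_content_expansion_suggestions(suggestions: List[str]) -> List[str]:
--     """Filter suggestions that would expand content when length reduction is needed."""
--     CONTENT_EXPANSION_PHRASES = [
--         "provide more",
--         "include more",
--         "add more",
--         "incorporate",
--         "enhance",
--         "expand",
--         "elaborate",
--         "examples",
--         "case studies",
--         "provide additional",
--         "include additional",
--         "add details",
--         "give more",
--         "offer more",
--         "present more",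
--         "show more",
--         "develop further",
--         "go deeper",
--         "more comprehensive",
--         "more thorough",
--         "additional information",
--     ]
--
--     filtered_suggestions = []
--     for suggestion in suggestions:
--         suggestion_lower = suggestion.lower()
--         if not any(phrase in suggestion_lower for phrase in CONTENT_EXPANSION_PHRASES):
--             filtered_suggestions.append(suggestion)
--
--     return filtered_suggestions
-- ===== SOURCE B (Python) =====
-- from typing import Any, Dict, List, Optional, Union
--
-- def _filter_content_expansion_suggestions(suggestions: List[str]) -> List[str]:
--     """Filter suggestions that would expand content when length reduction is needed."""
--     CONTENT_EXPANSION_PHRASES = [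
--         "provide more",
--         "include more",
--         "add more",
--         "incorporate",
--         "enhance",
--         "expand",
--         "elaborate",
--         "examples",
--         "case studies",
--         "provide additional",
--         "include additional",
--         "add details",
--         "give more",
--         "offer more",
--         "present more",
--         "show more",
--         "develop further",
--         "go deeper",
--         "more comprehensive",
--         "more thorough",
--         "additional information",
--     ]
--
--     # One-level trie: bucket the phrases by first character, then make a single
--     # left-to-right pass over each lowered suggestion, at each position testing
--     # only the phrases whose first character matches the character there.
--     index = {}
--     for p in CONTENT_EXPANSION_PHRASES:
--         index.setdefault(p[0], []).append(p)
--
--     return [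
--         s for s in suggestions
--         if not any(sl.startswith(p, i)
--                    for sl in (s.lower(),)
--                    for i, ch in enumerate(sl)
--                    for p in index.get(ch, ()))
--     ]
-- ===== Notes on version B (the rewrite author's own statement) =====
-- stated objective: alternative
-- what changed: Replaces the per-phrase 'phrase in s' substring scan with a one-level trie (phrases bucketed by first character) and a single left-to-right positional pass over each lowered suggestion, testing only the bucket of the character at each position.
import Mathlib
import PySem

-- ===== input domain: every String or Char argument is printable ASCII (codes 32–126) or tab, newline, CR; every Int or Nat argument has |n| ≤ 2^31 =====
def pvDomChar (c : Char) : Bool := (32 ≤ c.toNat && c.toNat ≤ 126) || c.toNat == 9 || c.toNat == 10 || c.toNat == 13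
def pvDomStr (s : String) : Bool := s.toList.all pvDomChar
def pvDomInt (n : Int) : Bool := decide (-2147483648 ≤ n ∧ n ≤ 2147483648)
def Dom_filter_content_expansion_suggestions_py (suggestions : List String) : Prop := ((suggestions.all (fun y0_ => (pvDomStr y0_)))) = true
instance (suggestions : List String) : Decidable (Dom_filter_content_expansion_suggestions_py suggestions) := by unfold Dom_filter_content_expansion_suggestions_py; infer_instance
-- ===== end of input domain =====

-- B replaces the per-phrase substring scan by a one-level trie (phrases bucketed by first
-- character) and a single left-to-right positional pass over each lowered suggestion; the
-- objective is an alternative data representation, not speed.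


-- ===== PORT A =====
def pvPhrasesA : List String :=
  ["provide more", "include more", "add more", "incorporate", "enhance", "expand",
   "elaborate", "examples", "case studies", "provide additional", "include additional",
   "add details", "give more", "offer more", "present more", "show more",
   "develop further", "go deeper", "more comprehensive", "more thorough",
   "additional information"]

def filter_content_expansion_suggestions_py (suggestions : List String) : List String :=
  suggestions.foldl (fun acc suggestion =>
    let suggestion_lower := PySem.Str.lower suggestion
    if !(pvPhrasesA.any (fun phrase => PySem.Str.isIn phrase suggestion_lower)) then
      acc ++ [suggestion]
    else acc) []

-- ===== PORT B =====
def pvPhrasesB : List String :=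
  ["provide more", "include more", "add more", "incorporate", "enhance", "expand",
   "elaborate", "examples", "case studies", "provide additional", "include additional",
   "add details", "give more", "offer more", "present more", "show more",
   "develop further", "go deeper", "more comprehensive", "more thorough",
   "additional information"]

-- index.setdefault(p[0], []).append(p); the single-character string key p[0] is ported as the
-- Char p.toList.headD ' ' (exact here: every phrase is a nonempty literal, and equality of
-- one-character strings is equality of their characters).
def pvIndexB : PySem.Dict Char (List (List Char)) :=
  pvPhrasesB.foldl (fun d p =>
    PySem.Dict.insert d (p.toList.headD ' ')
      (PySem.Dict.getD d (p.toList.headD ' ') [] ++ [p.toList])) (PySem.Dict.mk [])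

-- the generator 'any(sl.startswith(p, i) for i, ch in enumerate(sl) for p in index.get(ch, ()))',
-- walked as the structural recursion over the suffixes of sl (sl.startswith(p, i) is exactly
-- 'the suffix of sl from i starts with p', and ch is that suffix's head).
def pvScanB : List Char → Bool
  | [] => false
  | c :: rest =>
      (PySem.Dict.getD pvIndexB c []).any (fun p => PySem.Chars.startswith (c :: rest) p)
        || pvScanB rest

def filter_content_expansion_suggestions_py_alt (suggestions : List String) : List String :=
  suggestions.filter (fun s => !pvScanB (PySem.Chars.lower s.toList))

-- ===== PRECONDITION & SPEC =====
def Spec_filter_content_expansion_suggestions_py (suggestions : List String) (out : List String) : Prop := out = filter_content_expansion_suggestions_py_alt suggestions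
instance (suggestions : List String) (out : List String) : Decidable (Spec_filter_content_expansion_suggestions_py suggestions out) := by unfold Spec_filter_content_expansion_suggestions_py; infer_instance

-- ===== CLAIM (what is proved, stated in full; the proofs are below) =====
def Claim_equal_filter_content_expansion_suggestions_py : Prop := ∀ (suggestions : List String), Dom_filter_content_expansion_suggestions_py suggestions → Spec_filter_content_expansion_suggestions_py suggestions (filter_content_expansion_suggestions_py suggestions)

-- ===== LEMMAS AND PROOFS =====

-- 'sub in (c :: s)' splits into a match at position 0 plus 'sub in s'.
lemma pv_isIn_cons (sub : List Char) (c : Char) (s : List Char) :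
    PySem.Chars.isIn sub (c :: s)
      = (PySem.Chars.startswith (c :: s) sub || PySem.Chars.isIn sub s) := by
  rw [Bool.eq_iff_iff]
  simp only [Bool.or_eq_true, PySem.Chars.isIn_iff_infix, PySem.Chars.startswith_iff]
  exact List.infix_cons_iff

-- any distributes over a pointwise || .
lemma pv_any_or {α : Type} (l : List α) (f g : α → Bool) :
    (l.any fun x => f x || g x) = (l.any f || l.any g) := by
  induction l with
  | nil => rfl
  | cons a t ih =>
    simp only [List.any_cons, ih]
    simp [Bool.or_assoc, Bool.or_left_comm]

-- what one bucket of the first-character index contains.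
lemma pv_getD_build (P : List String) (d : PySem.Dict Char (List (List Char))) (c : Char) :
    PySem.Dict.getD (P.foldl (fun d p =>
        PySem.Dict.insert d (p.toList.headD ' ')
          (PySem.Dict.getD d (p.toList.headD ' ') [] ++ [p.toList])) d) c []
      = PySem.Dict.getD d c []
          ++ (P.filter (fun p => p.toList.headD ' ' == c)).map String.toList := by
  induction P generalizing d with
  | nil => simp
  | cons p t ih =>
    rw [List.foldl_cons, ih, PySem.Dict.getD_insert, List.filter_cons]
    by_cases h : c = p.toList.headD ' '
    · have hb : (p.toList.headD ' ' == c) = true := by rw [beq_iff_eq]; exact h.symm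
      rw [if_pos h, if_pos hb, h]
      simp only [List.map_cons, List.append_assoc, List.singleton_append]
    · have hb : (p.toList.headD ' ' == c) = false :=
        beq_eq_false_iff_ne.mpr (fun e => h e.symm)
      rw [if_neg h, if_neg (by rw [hb]; exact Bool.false_ne_true)]

-- a phrase whose first character is not c cannot match at a position holding c.
lemma pv_sw_false (c : Char) (s p : List Char) (hp : p ≠ [])
    (h : ¬ (p.headD ' ' == c) = true) :
    PySem.Chars.startswith (c :: s) p = false := by
  cases p with
  | nil => exact absurd rfl hp
  | cons d tl =>
    simp only [List.headD_cons, beq_iff_eq] at h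
    simp [PySem.Chars.startswith, List.isPrefixOf, h]

-- restricting the phrase list to the bucket of c loses no match at a position holding c.
lemma pv_any_filter (P : List (List Char)) (hP : ∀ p ∈ P, p ≠ []) (c : Char) (s : List Char) :
    ((P.filter (fun p => p.headD ' ' == c)).any fun p => PySem.Chars.startswith (c :: s) p)
      = (P.any fun p => PySem.Chars.startswith (c :: s) p) := by
  induction P with
  | nil => rfl
  | cons p t ih =>
    have hp : p ≠ [] := hP p (List.mem_cons_self)
    have ht : ∀ q ∈ t, q ≠ [] := fun q hq => hP q (List.mem_cons_of_mem _ hq)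
    rw [List.filter_cons]
    by_cases h : (p.headD ' ' == c) = true
    · rw [if_pos h, List.any_cons, List.any_cons, ih ht]
    · rw [if_neg h, List.any_cons, pv_sw_false c s p hp h, Bool.false_or, ih ht]

-- the bucket lookup at c decides exactly what A's whole-list any decides at that position.
lemma pv_bucket_any (c : Char) (s : List Char) :
    ((PySem.Dict.getD pvIndexB c []).any fun p => PySem.Chars.startswith (c :: s) p)
      = (pvPhrasesA.any fun ph => PySem.Chars.startswith (c :: s) ph.toList) := by
  unfold pvIndexB
  rw [pv_getD_build]
  have hcomp : (pvPhrasesB.filter (fun p => p.toList.headD ' ' == c)).map String.toList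
      = (pvPhrasesB.map String.toList).filter (fun l => l.headD ' ' == c) := by
    rw [List.filter_map]
    rfl
  have hne : ∀ p ∈ pvPhrasesB.map String.toList, p ≠ [] := by decide
  have h0 : PySem.Dict.getD (PySem.Dict.mk ([] : List (Char × List (List Char)))) c
      ([] : List (List Char)) = [] := rfl
  rw [h0, List.nil_append, hcomp, pv_any_filter _ hne c s, List.any_map]
  rfl

-- B's positional bucket scan finds a phrase occurrence iff A's per-phrase scan does.
lemma pv_scan_eq (cs : List Char) :
    pvScanB cs = pvPhrasesA.any (fun phrase => PySem.Chars.isIn phrase.toList cs) := by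
  induction cs with
  | nil => decide
  | cons c rest ih =>
    rw [pvScanB, ih, pv_bucket_any]
    simp only [pv_isIn_cons]
    rw [pv_any_or]

-- ===== VERDICT (by name: the statement is the Claim_ definition above) =====
theorem filter_content_expansion_suggestions_py_spec : Claim_equal_filter_content_expansion_suggestions_py := by
  intro suggestions _
  unfold Spec_filter_content_expansion_suggestions_py
  unfold filter_content_expansion_suggestions_py filter_content_expansion_suggestions_py_alt
  rw [show (fun (acc : List String) suggestion =>
        let suggestion_lower := PySem.Str.lower suggestion
        if !(pvPhrasesA.any (fun phrase => PySem.Str.isIn phrase suggestion_lower)) then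
          acc ++ [suggestion]
        else acc)
      = (fun (acc : List String) x =>
          if (fun s => !(pvPhrasesA.any (fun phrase =>
                PySem.Str.isIn phrase (PySem.Str.lower s)))) x then acc ++ [id x] else acc)
      from rfl]
  rw [PySem.List.foldl_append_if]
  simp only [List.nil_append, List.map_id]
  apply List.filter_congr
  intro s _
  simp [pv_scan_eq]
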